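-- pv_equiv track=rewrite | github.com/amitsajwan/option_trading | market_data_dashboard/strategy_evaluation_service.py | _streaks_from_signs
-- ===== SOURCE A (Python) =====
-- def _streaks_from_signs(values: list[int]) -> tuple[int, int]:
--     max_win = 0
--     max_loss = 0
--     cur_win = 0
--     cur_loss = 0
--     for item in values:
--         if item > 0:
--             cur_win += 1
--             cur_loss = 0
--             max_win = max(max_win, cur_win)
--         elif item < 0:
--             cur_loss += 1
--             cur_win = 0
--             max_loss = max(max_loss, cur_loss)
--         else:
--             cur_win = 0
--             cur_loss = 0
--     return max_win, max_loss
-- ===== SOURCE B (Python) =====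
-- from itertools import groupby
--
--
-- def _streaks_from_signs(values: list[int]) -> tuple[int, int]:
--     max_win = 0
--     max_loss = 0
--     for sign, group in groupby(values, key=lambda x: (x > 0) - (x < 0)):
--         length = sum(1 for _ in group)
--         if sign > 0:
--             max_win = max(max_win, length)
--         elif sign < 0:
--             max_loss = max(max_loss, length)
--     return max_win, max_loss
-- ===== Notes on version B (the rewrite author's own statement) =====
-- stated objective: idiomatic
-- what changed: Replaces the four-variable running-streak state machine by itertools.groupby over the sign key, taking a max over the lengths of the maximal equal-sign runs (zeros form their own ignored groups).
import Mathlib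
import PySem

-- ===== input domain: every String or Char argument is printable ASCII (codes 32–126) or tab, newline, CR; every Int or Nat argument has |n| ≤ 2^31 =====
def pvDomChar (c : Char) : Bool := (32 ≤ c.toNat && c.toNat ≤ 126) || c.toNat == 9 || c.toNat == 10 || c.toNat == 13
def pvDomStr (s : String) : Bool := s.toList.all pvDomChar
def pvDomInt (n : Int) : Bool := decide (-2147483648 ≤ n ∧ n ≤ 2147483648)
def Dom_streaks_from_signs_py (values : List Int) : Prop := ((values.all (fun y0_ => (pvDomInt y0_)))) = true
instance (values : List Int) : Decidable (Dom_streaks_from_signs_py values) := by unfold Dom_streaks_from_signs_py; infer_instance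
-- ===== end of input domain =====

-- B replaces A's four-variable running-streak state machine by a groupby-style
-- decomposition into maximal equal-sign runs (idiomatic; same O(n) cost).

-- ===== PORT A =====
-- one iteration of A's for-loop over the state (max_win, max_loss, cur_win, cur_loss)
def stepA (st : Int × Int × Int × Int) (item : Int) : Int × Int × Int × Int :=
  if 0 < item then (max st.1 (st.2.2.1 + 1), st.2.1, st.2.2.1 + 1, 0)
  else if item < 0 then (st.1, max st.2.1 (st.2.2.2 + 1), 0, st.2.2.2 + 1)
  else (st.1, st.2.1, 0, 0)

def streaks_from_signs_py (values : List Int) : Int × Int :=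
  let st := values.foldl stepA (0, 0, 0, 0)
  (st.1, st.2.1)

-- ===== PORT B =====
-- the sign key of Source B's groupby: (x > 0) - (x < 0)
def pvSign (x : Int) : Int := (if 0 < x then 1 else 0) - (if x < 0 then 1 else 0)

-- Source B's groupby loop: peel off the maximal leading run of equal sign, take maxes
def bLoop (values : List Int) (mw ml : Int) : Int × Int :=
  match values with
  | [] => (mw, ml)
  | x :: rest =>
    let s := pvSign x
    let len : Int := ((x :: rest).takeWhile (fun y => pvSign y == s)).length
    let tail := (x :: rest).dropWhile (fun y => pvSign y == s)
    if 0 < s then bLoop tail (max mw len) ml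
    else if s < 0 then bLoop tail mw (max ml len)
    else bLoop tail mw ml
termination_by values.length
decreasing_by
  all_goals
    show (List.dropWhile (fun y => pvSign y == pvSign x) (x :: rest)).length < (x :: rest).length
    rw [List.dropWhile_cons_of_pos (by simp)]
    exact Nat.lt_succ_of_le (List.length_dropWhile_le _ _)

def streaks_from_signs_py_alt (values : List Int) : Int × Int := bLoop values 0 0

-- ===== PRECONDITION & SPEC =====
def Spec_streaks_from_signs_py (values : List Int) (out : Int × Int) : Prop := out = streaks_from_signs_py_alt values
instance (values : List Int) (out : Int × Int) : Decidable (Spec_streaks_from_signs_py values out) := by unfold Spec_streaks_from_signs_py; infer_instance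

-- ===== CLAIM (what is proved, stated in full; the proofs are below) =====
def Claim_equal_streaks_from_signs_py : Prop := ∀ (values : List Int), Dom_streaks_from_signs_py values → Spec_streaks_from_signs_py values (streaks_from_signs_py values)

-- ===== LEMMAS AND PROOFS =====

lemma streaks_eq (vs : List Int) :
    streaks_from_signs_py vs = ((vs.foldl stepA (0,0,0,0)).1, (vs.foldl stepA (0,0,0,0)).2.1) := rfl

-- starting maxima factor out of A's loop
lemma foldA_shift (vs : List Int) : ∀ mw ml cw cl : Int, 0 ≤ mw → 0 ≤ ml →
    vs.foldl stepA (mw, ml, cw, cl) =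
      (max mw (vs.foldl stepA (0, 0, cw, cl)).1,
       max ml (vs.foldl stepA (0, 0, cw, cl)).2.1,
       (vs.foldl stepA (0, 0, cw, cl)).2.2.1,
       (vs.foldl stepA (0, 0, cw, cl)).2.2.2) := by
  induction vs with
  | nil =>
    intro mw ml cw cl hw hl
    simp only [List.foldl_nil]
    have h1 : (max mw ((0:Int),(0:Int),cw,cl).1) = mw := by simp; omega
    have h2 : (max ml ((0:Int),(0:Int),cw,cl).2.1) = ml := by simp; omega
    rw [h1, h2]
  | cons x vs ih =>
    intro mw ml cw cl hw hl
    simp only [List.foldl_cons]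
    by_cases hx : 0 < x
    · rw [show stepA (mw, ml, cw, cl) x = (max mw (cw + 1), ml, cw + 1, 0) by
            simp [stepA, if_pos hx],
          show stepA ((0:Int), (0:Int), cw, cl) x = (max 0 (cw + 1), 0, cw + 1, 0) by
            simp [stepA, if_pos hx],
          ih (max mw (cw + 1)) ml (cw + 1) 0 (by omega) hl,
          ih (max 0 (cw + 1)) 0 (cw + 1) 0 (by omega) le_rfl]
      simp only [Prod.mk.injEq]
      exact ⟨by omega, by omega, trivial⟩
    · by_cases hx' : x < 0
      · rw [show stepA (mw, ml, cw, cl) x = (mw, max ml (cl + 1), 0, cl + 1) by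
              simp [stepA, if_neg hx, if_pos hx'],
            show stepA ((0:Int), (0:Int), cw, cl) x = (0, max 0 (cl + 1), 0, cl + 1) by
              simp [stepA, if_neg hx, if_pos hx'],
            ih mw (max ml (cl + 1)) 0 (cl + 1) hw (by omega),
            ih 0 (max 0 (cl + 1)) 0 (cl + 1) le_rfl (by omega)]
        simp only [Prod.mk.injEq]
        exact ⟨by omega, by omega, trivial⟩
      · rw [show stepA (mw, ml, cw, cl) x = (mw, ml, 0, 0) by
              simp [stepA, if_neg hx, if_neg hx'],
            show stepA ((0:Int), (0:Int), cw, cl) x = (0, 0, 0, 0) by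
              simp [stepA, if_neg hx, if_neg hx'],
            ih mw ml 0 0 hw hl, ih 0 0 0 0 le_rfl le_rfl]

-- processing a nonempty all-positive run accumulates its length into cur_win/max_win
lemma foldA_pos_run (run' : List Int) : ∀ (y : Int), 0 < y → (∀ z ∈ run', 0 < z) →
    ∀ (mw ml cw cl : Int) (tail : List Int),
    ((y :: run') ++ tail).foldl stepA (mw, ml, cw, cl) =
      tail.foldl stepA (max mw (cw + 1 + run'.length), ml, cw + 1 + run'.length, 0) := by
  induction run' with
  | nil =>
    intro y hy _ mw ml cw cl tail
    simp [stepA, if_pos hy]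
  | cons z run'' ih =>
    intro y hy hall mw ml cw cl tail
    have hz : 0 < z := hall z (by simp)
    have hall' : ∀ w ∈ run'', 0 < w := fun w hw => hall w (by simp [hw])
    have hstep : stepA (mw, ml, cw, cl) y = (max mw (cw + 1), ml, cw + 1, 0) := by
      simp [stepA, if_pos hy]
    have hlen : (((z :: run'').length : Nat) : Int) = (run''.length : Int) + 1 := by simp
    rw [List.cons_append, List.foldl_cons, hstep,
        ih z hz hall' (max mw (cw + 1)) ml (cw + 1) 0 tail, hlen]
    refine congrArg (fun st => List.foldl stepA st tail) ?_
    simp only [Prod.mk.injEq]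
    and_intros <;> first | trivial | omega

-- mirror for a nonempty all-negative run
lemma foldA_neg_run (run' : List Int) : ∀ (y : Int), y < 0 → (∀ z ∈ run', z < 0) →
    ∀ (mw ml cw cl : Int) (tail : List Int),
    ((y :: run') ++ tail).foldl stepA (mw, ml, cw, cl) =
      tail.foldl stepA (mw, max ml (cl + 1 + run'.length), 0, cl + 1 + run'.length) := by
  induction run' with
  | nil =>
    intro y hy _ mw ml cw cl tail
    simp [stepA, if_neg (by omega : ¬ 0 < y), if_pos hy]
  | cons z run'' ih =>
    intro y hy hall mw ml cw cl tail
    have hz : z < 0 := hall z (by simp)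
    have hall' : ∀ w ∈ run'', w < 0 := fun w hw => hall w (by simp [hw])
    have hstep : stepA (mw, ml, cw, cl) y = (mw, max ml (cl + 1), 0, cl + 1) := by
      simp [stepA, if_neg (by omega : ¬ 0 < y), if_pos hy]
    have hlen : (((z :: run'').length : Nat) : Int) = (run''.length : Int) + 1 := by simp
    rw [List.cons_append, List.foldl_cons, hstep,
        ih z hz hall' mw (max ml (cl + 1)) 0 (cl + 1) tail, hlen]
    refine congrArg (fun st => List.foldl stepA st tail) ?_
    simp only [Prod.mk.injEq]
    and_intros <;> first | trivial | omega

-- a nonempty run of zeros just resets the current streaks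
lemma foldA_zero_run (run' : List Int) : ∀ (y : Int), y = 0 → (∀ z ∈ run', z = 0) →
    ∀ (mw ml cw cl : Int) (tail : List Int),
    ((y :: run') ++ tail).foldl stepA (mw, ml, cw, cl) =
      tail.foldl stepA (mw, ml, 0, 0) := by
  induction run' with
  | nil =>
    intro y hy _ mw ml cw cl tail
    simp [stepA, hy]
  | cons z run'' ih =>
    intro y hy hall mw ml cw cl tail
    have hz : z = 0 := hall z (by simp)
    have hall' : ∀ w ∈ run'', w = 0 := fun w hw => hall w (by simp [hw])
    have hstep : stepA (mw, ml, cw, cl) y = (mw, ml, 0, 0) := by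
      simp [stepA, hy]
    rw [List.cons_append, List.foldl_cons, hstep,
        ih z hz hall' mw ml 0 0 tail]

-- B's loop results never decrease below the starting maxima
lemma bLoop_ge : ∀ (n : Nat) (vs : List Int), vs.length ≤ n → ∀ mw ml : Int,
    mw ≤ (bLoop vs mw ml).1 ∧ ml ≤ (bLoop vs mw ml).2 := by
  intro n
  induction n with
  | zero =>
    intro vs hvs mw ml
    have hnil : vs = [] := List.eq_nil_of_length_eq_zero (Nat.le_zero.mp hvs)
    subst hnil; simp [bLoop]
  | succ n ih =>
    intro vs hvs mw ml
    match vs with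
    | [] => simp [bLoop]
    | x :: rest =>
      rw [bLoop]
      have hlen : ((x :: rest).dropWhile (fun y => pvSign y == pvSign x)).length ≤ n := by
        rw [List.dropWhile_cons_of_pos (by simp)]
        have h3 := List.length_dropWhile_le (fun y => pvSign y == pvSign x) rest
        simp at hvs; omega
      split_ifs with h1 h2
      · exact ⟨le_trans (le_max_left _ _) (ih _ hlen _ _).1, (ih _ hlen _ _).2⟩
      · exact ⟨(ih _ hlen _ _).1, le_trans (le_max_left _ _) (ih _ hlen _ _).2⟩
      · exact ih _ hlen _ _

-- starting maxima factor out of B's loop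
lemma bLoop_shift : ∀ (n : Nat) (vs : List Int), vs.length ≤ n → ∀ mw ml : Int,
    0 ≤ mw → 0 ≤ ml →
    bLoop vs mw ml = (max mw (bLoop vs 0 0).1, max ml (bLoop vs 0 0).2) := by
  intro n
  induction n with
  | zero =>
    intro vs hvs mw ml hw hl
    have hnil : vs = [] := List.eq_nil_of_length_eq_zero (Nat.le_zero.mp hvs)
    subst hnil; simp [bLoop]; constructor <;> omega
  | succ n ih =>
    intro vs hvs mw ml hw hl
    match vs with
    | [] => simp [bLoop]; constructor <;> omega
    | x :: rest =>
      rw [bLoop, bLoop]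
      have hlen : ((x :: rest).dropWhile (fun y => pvSign y == pvSign x)).length ≤ n := by
        rw [List.dropWhile_cons_of_pos (by simp)]
        have h3 := List.length_dropWhile_le (fun y => pvSign y == pvSign x) rest
        simp at hvs; omega
      have hL : (0 : Int) ≤ ((x :: rest).takeWhile (fun y => pvSign y == pvSign x)).length := by
        positivity
      have hge := bLoop_ge n _ hlen (0 : Int) (0 : Int)
      split_ifs with h1 h2
      · rw [ih _ hlen (max mw _) ml (by omega) hl, ih _ hlen (max 0 _) 0 (by omega) le_rfl]
        simp only [Prod.mk.injEq]
        constructor <;> omega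
      · rw [ih _ hlen mw (max ml _) hw (by omega), ih _ hlen 0 (max 0 _) le_rfl (by omega)]
        simp only [Prod.mk.injEq]
        constructor <;> omega
      · rw [ih _ hlen mw ml hw hl]

-- elements of the leading run all share the head's strict sign
lemma run_mem_pos (x : Int) (rest : List Int) (hx : 0 < x) :
    ∀ z ∈ (x :: rest).takeWhile (fun y => pvSign y == pvSign x), 0 < z := by
  intro z hz
  have h := List.mem_takeWhile_imp hz
  simp only [pvSign, if_pos hx, if_neg (by omega : ¬ x < 0), beq_iff_eq] at h
  by_contra hc
  rw [if_neg hc] at h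
  split_ifs at h <;> omega

lemma run_mem_neg (x : Int) (rest : List Int) (hx : x < 0) :
    ∀ z ∈ (x :: rest).takeWhile (fun y => pvSign y == pvSign x), z < 0 := by
  intro z hz
  have h := List.mem_takeWhile_imp hz
  simp only [pvSign, if_neg (by omega : ¬ 0 < x), if_pos hx, beq_iff_eq] at h
  by_contra hc
  rw [if_neg hc] at h
  split_ifs at h <;> omega

lemma run_mem_zero (x : Int) (rest : List Int) (hx : x = 0) :
    ∀ z ∈ (x :: rest).takeWhile (fun y => pvSign y == pvSign x), z = 0 := by
  intro z hz
  have h := List.mem_takeWhile_imp hz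
  subst hx
  simp only [pvSign, beq_iff_eq] at h
  norm_num at h
  split_ifs at h <;> omega

-- the head of the dropped tail fails the run predicate
lemma tail_head_not (p : Int → Bool) (l : List Int) (z : Int) (t : List Int)
    (h : l.dropWhile p = z :: t) : p z = false := by
  induction l with
  | nil => simp [List.dropWhile] at h
  | cons a l ih =>
    by_cases ha : p a
    · rw [List.dropWhile_cons_of_pos ha] at h; exact ih h
    · rw [List.dropWhile_cons_of_neg ha] at h
      cases h; simpa using ha

-- after a positive run (stale cur_win, tail head not positive, or tail empty),
-- A's remaining loop from maxima (mw, ml) agrees with B's loop from (mw, ml)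
lemma combine_cw (n : Nat) (t : List Int) (ht : t.length ≤ n)
    (hih : streaks_from_signs_py t = bLoop t 0 0)
    (hhead : ∀ z t', t = z :: t' → ¬ 0 < z)
    (mw ml cw : Int) (hmw : 0 ≤ mw) (hml : 0 ≤ ml) :
    ((t.foldl stepA (mw, ml, cw, 0)).1, (t.foldl stepA (mw, ml, cw, 0)).2.1)
      = bLoop t mw ml := by
  match t with
  | [] => simp [bLoop]
  | z :: t' =>
    have hz : ¬ 0 < z := hhead z t' rfl
    have hreset : (z :: t').foldl stepA (mw, ml, cw, 0) = (z :: t').foldl stepA (mw, ml, 0, 0) := by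
      simp only [List.foldl_cons, stepA, if_neg hz]
    rw [hreset, foldA_shift (z :: t') mw ml 0 0 hmw hml,
        bLoop_shift n (z :: t') ht mw ml hmw hml]
    rw [streaks_eq] at hih
    have h1 : ((z :: t').foldl stepA (0,0,0,0)).1 = (bLoop (z :: t') 0 0).1 :=
      congrArg Prod.fst hih
    have h2 : ((z :: t').foldl stepA (0,0,0,0)).2.1 = (bLoop (z :: t') 0 0).2 :=
      congrArg Prod.snd hih
    simp only [h1, h2]

-- mirror after a negative run (stale cur_loss, tail head not negative)
lemma combine_cl (n : Nat) (t : List Int) (ht : t.length ≤ n)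
    (hih : streaks_from_signs_py t = bLoop t 0 0)
    (hhead : ∀ z t', t = z :: t' → ¬ z < 0)
    (mw ml cl : Int) (hmw : 0 ≤ mw) (hml : 0 ≤ ml) :
    ((t.foldl stepA (mw, ml, 0, cl)).1, (t.foldl stepA (mw, ml, 0, cl)).2.1)
      = bLoop t mw ml := by
  match t with
  | [] => simp [bLoop]
  | z :: t' =>
    have hz : ¬ z < 0 := hhead z t' rfl
    have hreset : (z :: t').foldl stepA (mw, ml, 0, cl) = (z :: t').foldl stepA (mw, ml, 0, 0) := by
      simp only [List.foldl_cons, stepA, if_neg hz]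
    rw [hreset, foldA_shift (z :: t') mw ml 0 0 hmw hml,
        bLoop_shift n (z :: t') ht mw ml hmw hml]
    rw [streaks_eq] at hih
    have h1 : ((z :: t').foldl stepA (0,0,0,0)).1 = (bLoop (z :: t') 0 0).1 :=
      congrArg Prod.fst hih
    have h2 : ((z :: t').foldl stepA (0,0,0,0)).2.1 = (bLoop (z :: t') 0 0).2 :=
      congrArg Prod.snd hih
    simp only [h1, h2]

-- main equivalence, by strong induction on length via a fuel bound
lemma main_equiv : ∀ (n : Nat) (vs : List Int), vs.length ≤ n →
    streaks_from_signs_py vs = bLoop vs 0 0 := by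
  intro n
  induction n with
  | zero =>
    intro vs hvs
    have hnil : vs = [] := List.eq_nil_of_length_eq_zero (Nat.le_zero.mp hvs)
    subst hnil; simp [streaks_from_signs_py, bLoop]
  | succ n ih =>
    intro vs hvs
    match vs with
    | [] => simp [streaks_from_signs_py, bLoop]
    | x :: rest =>
      have hrun : (x :: rest).takeWhile (fun y => pvSign y == pvSign x)
          = x :: rest.takeWhile (fun y => pvSign y == pvSign x) :=
        List.takeWhile_cons_of_pos (by simp)
      have hsplit : (x :: rest)
          = (x :: rest.takeWhile (fun y => pvSign y == pvSign x))
            ++ (x :: rest).dropWhile (fun y => pvSign y == pvSign x) := by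
        rw [← hrun, List.takeWhile_append_dropWhile]
      have htail : (x :: rest).dropWhile (fun y => pvSign y == pvSign x)
          = rest.dropWhile (fun y => pvSign y == pvSign x) :=
        List.dropWhile_cons_of_pos (by simp)
      have hlen : ((x :: rest).dropWhile (fun y => pvSign y == pvSign x)).length ≤ n := by
        rw [htail]
        have h3 := List.length_dropWhile_le (fun y => pvSign y == pvSign x) rest
        simp at hvs; omega
      have hihtail := ih _ hlen
      have hheadtail : ∀ z t', (x :: rest).dropWhile (fun y => pvSign y == pvSign x) = z :: t'
          → (pvSign z == pvSign x) = false :=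
        fun z t' h => tail_head_not (fun y => pvSign y == pvSign x) _ z t' h
      have hLcast : ((((x :: rest).takeWhile (fun y => pvSign y == pvSign x)).length : Nat) : Int)
          = (0 : Int) + 1 + (rest.takeWhile (fun y => pvSign y == pvSign x)).length := by
        rw [hrun]; simp; ring
      rw [bLoop]
      rcases lt_trichotomy x 0 with hx | hx | hx
      · -- negative run
        have hs : pvSign x = -1 := by
          simp [pvSign, if_neg (by omega : ¬ 0 < x), if_pos hx]
        rw [if_neg (by rw [hs]; omega), if_pos (by rw [hs]; omega)]
        have hA : (x :: rest).foldl stepA (0,0,0,0) =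
            ((x :: rest).dropWhile (fun y => pvSign y == pvSign x)).foldl stepA
              (0, max 0 ((0:Int) + 1 + (rest.takeWhile (fun y => pvSign y == pvSign x)).length), 0,
                (0 : Int) + 1 + (rest.takeWhile (fun y => pvSign y == pvSign x)).length) := by
          conv_lhs => rw [hsplit]
          exact foldA_neg_run (rest.takeWhile (fun y => pvSign y == pvSign x)) x hx
            (fun z hz => run_mem_neg x rest hx z (by rw [hrun]; exact List.mem_cons_of_mem _ hz))
            0 0 0 0 ((x :: rest).dropWhile (fun y => pvSign y == pvSign x))
        rw [streaks_eq, hA]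
        have hcomb := combine_cl n ((x :: rest).dropWhile (fun y => pvSign y == pvSign x)) hlen hihtail
          (fun z t' h => by
            have hzp := hheadtail z t' h
            intro hzneg
            have hsz : pvSign z = -1 := by
              simp [pvSign, if_neg (by omega : ¬ 0 < z), if_pos hzneg]
            simp [hsz, hs] at hzp)
          0 (max 0 ((0:Int) + 1 + (rest.takeWhile (fun y => pvSign y == pvSign x)).length))
          ((0:Int) + 1 + (rest.takeWhile (fun y => pvSign y == pvSign x)).length)
          le_rfl (le_max_left _ _)
        rw [hcomb, hLcast]
      · -- zero run
        have hs : pvSign x = 0 := by simp [pvSign, hx]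
        rw [if_neg (by rw [hs]; omega), if_neg (by rw [hs]; omega)]
        have hA : (x :: rest).foldl stepA (0,0,0,0) =
            ((x :: rest).dropWhile (fun y => pvSign y == pvSign x)).foldl stepA (0, 0, 0, 0) := by
          conv_lhs => rw [hsplit]
          exact foldA_zero_run (rest.takeWhile (fun y => pvSign y == pvSign x)) x hx
            (fun z hz => run_mem_zero x rest hx z (by rw [hrun]; exact List.mem_cons_of_mem _ hz))
            0 0 0 0 ((x :: rest).dropWhile (fun y => pvSign y == pvSign x))
        rw [streaks_eq, hA, ← streaks_eq, hihtail]
      · -- positive run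
        have hs : pvSign x = 1 := by
          simp [pvSign, if_pos hx, if_neg (by omega : ¬ x < 0)]
        rw [if_pos (by rw [hs]; omega)]
        have hA : (x :: rest).foldl stepA (0,0,0,0) =
            ((x :: rest).dropWhile (fun y => pvSign y == pvSign x)).foldl stepA
              (max 0 ((0:Int) + 1 + (rest.takeWhile (fun y => pvSign y == pvSign x)).length), 0,
                (0 : Int) + 1 + (rest.takeWhile (fun y => pvSign y == pvSign x)).length, 0) := by
          conv_lhs => rw [hsplit]
          exact foldA_pos_run (rest.takeWhile (fun y => pvSign y == pvSign x)) x hx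
            (fun z hz => run_mem_pos x rest hx z (by rw [hrun]; exact List.mem_cons_of_mem _ hz))
            0 0 0 0 ((x :: rest).dropWhile (fun y => pvSign y == pvSign x))
        rw [streaks_eq, hA]
        have hcomb := combine_cw n ((x :: rest).dropWhile (fun y => pvSign y == pvSign x)) hlen hihtail
          (fun z t' h => by
            have hzp := hheadtail z t' h
            intro hzpos
            have hsz : pvSign z = 1 := by
              simp [pvSign, if_pos hzpos, if_neg (by omega : ¬ z < 0)]
            simp [hsz, hs] at hzp)
          (max 0 ((0:Int) + 1 + (rest.takeWhile (fun y => pvSign y == pvSign x)).length)) 0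
          ((0:Int) + 1 + (rest.takeWhile (fun y => pvSign y == pvSign x)).length)
          (le_max_left _ _) le_rfl
        rw [hcomb, hLcast]

-- ===== VERDICT (by name: the statement is the Claim_ definition above) =====
theorem streaks_from_signs_py_spec : Claim_equal_streaks_from_signs_py := by
  intro values _
  unfold Spec_streaks_from_signs_py streaks_from_signs_py_alt
  exact main_equiv values.length values le_rfl
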